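-- pv_equiv track=rewrite | github.com/chiralcentre/Kattis | golombrulers.py | solve
-- ===== SOURCE A (Python) =====
-- def solve(marks):
--     diffs = set()
--     for i in range(len(marks)):
--         for j in range(i + 1, len(marks)):
--             d = marks[j] - marks[i]
--             if d not in diffs:
--                 diffs.add(d)
--             else:
--                 return "not a ruler"
--     H = max(marks)
--     missing = [i for i in range(1, H + 1) if i not in diffs]
--     if missing:
--         return f"missing {' '.join(str(num) for num in missing)}"
--     else:
--         return "perfect"
-- ===== SOURCE B (Python) =====
-- def solve(marks):
--     n = len(marks)
--     diffs = sorted(marks[j] - marks[i] for i in range(n) for j in range(i + 1, n))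
--     if any(a == b for a, b in zip(diffs, diffs[1:])):
--         return "not a ruler"
--     missing = []
--     rest = diffs
--     for v in range(1, max(marks) + 1):
--         while rest and rest[0] < v:
--             rest = rest[1:]
--         if not rest or rest[0] != v:
--             missing.append(str(v))
--     if missing:
--         return "missing " + " ".join(missing)
--     return "perfect"
-- ===== Notes on version B (the rewrite author's own statement) =====
-- stated objective: alternative
-- what changed: B sorts the list of pairwise differences once and decides 'not a ruler' by checking adjacent equal elements of the sorted list, then finds the missing values with a two-pointer merge of the sorted differences against 1..max(marks); A instead maintains a hash set incrementally with an early return inside the nested loops and tests set membership for each candidate value.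
import Mathlib
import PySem

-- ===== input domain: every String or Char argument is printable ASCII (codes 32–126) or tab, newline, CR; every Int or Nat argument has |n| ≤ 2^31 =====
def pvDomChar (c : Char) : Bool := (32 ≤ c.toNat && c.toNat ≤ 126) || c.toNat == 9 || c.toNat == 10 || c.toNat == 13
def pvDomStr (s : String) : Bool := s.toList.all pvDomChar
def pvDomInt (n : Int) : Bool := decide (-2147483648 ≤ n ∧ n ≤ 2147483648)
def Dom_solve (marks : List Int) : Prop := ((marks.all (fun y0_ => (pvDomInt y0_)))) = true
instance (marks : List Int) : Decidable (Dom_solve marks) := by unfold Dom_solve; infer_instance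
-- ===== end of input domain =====

-- B sorts the pairwise differences once, decides 'not a ruler' by an adjacent-equal scan of the
-- sorted list and finds the missing values by a two-pointer merge against 1..max(marks), instead
-- of A's incremental hash set with an early return and per-value membership tests (objective: alternative).

-- ===== PORT A =====
def solve (marks : List Int) : String :=
  match (PySem.List.pyRange 0 (PySem.List.len marks) 1).foldl
      (fun acc i =>
        match acc with
        | none => none
        | some diffs =>
          (PySem.List.pyRange (i + 1) (PySem.List.len marks) 1).foldl
            (fun acc2 j =>
              match acc2 with
              | none => none
              | some diffs =>
                let d := PySem.List.pyGetD marks j 0 - PySem.List.pyGetD marks i 0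
                if PySem.Set.contains diffs d then none else some (PySem.Set.add diffs d))
            (some diffs))
      (some (PySem.Set.empty : PySem.Set Int)) with
  | none => "not a ruler"   -- the early 'return "not a ruler"'
  | some diffs =>
    match PySem.List.max? marks (fun x => x) with
    | none => ""            -- max([]) raises ValueError: excluded by Pre_solve
    | some H =>
      let missing := (PySem.List.pyRange 1 (H + 1) 1).filter
        (fun i => !(PySem.Set.contains diffs i))
      if missing ≠ [] then
        "missing " ++ PySem.Str.join " " (missing.map PySem.Int.toStr)
      else "perfect"

-- ===== PORT B =====
-- the 'while rest and rest[0] < v: rest = rest[1:]' loop of Source B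
def pvSkip (v : Int) : List Int → List Int
  | [] => []
  | x :: t => if x < v then pvSkip v t else x :: t

def solve_alt (marks : List Int) : String :=
  let n := PySem.List.len marks
  let diffs := PySem.List.sorted
    ((PySem.List.pyRange 0 n 1).flatMap
      (fun i => (PySem.List.pyRange (i + 1) n 1).map
        (fun j => PySem.List.pyGetD marks j 0 - PySem.List.pyGetD marks i 0)))
    (fun x => x) false
  if (diffs.zip (PySem.List.slice diffs (some 1) none)).any (fun p => p.1 == p.2) then
    "not a ruler"
  else
    match PySem.List.max? marks (fun x => x) with
    | none => ""            -- max([]) raises ValueError: excluded by Pre_solve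
    | some H =>
      let st := (PySem.List.pyRange 1 (H + 1) 1).foldl
        (fun (st : List Int × List String) v =>
          let rest := pvSkip v st.1
          if decide (rest = []) || (PySem.List.pyGetD rest 0 0 != v) then
            (rest, st.2 ++ [PySem.Int.toStr v])
          else (rest, st.2))
        (diffs, ([] : List String))
      if st.2 ≠ [] then "missing " ++ PySem.Str.join " " st.2 else "perfect"

-- ===== PRECONDITION & SPEC =====
-- Pre_ excludes only the empty list, on which both Pythons raise ValueError at max(marks).
def Pre_solve (marks : List Int) : Prop := marks ≠ []
instance (marks : List Int) : Decidable (Pre_solve marks) := by unfold Pre_solve; infer_instance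
def pvWitness_solve : List Int := ([0, 1, 3] : List Int)
def Spec_solve (marks : List Int) (out : String) : Prop := out = solve_alt marks
instance (marks : List Int) (out : String) : Decidable (Spec_solve marks out) := by unfold Spec_solve; infer_instance

-- ===== CLAIM (what is proved, stated in full; the proofs are below) =====
def Claim_equal_solve : Prop := ∀ (marks : List Int), Dom_solve marks → Pre_solve marks → Spec_solve marks (solve marks)

-- ===== LEMMAS AND PROOFS =====

-- the insert-or-fail step that A's nested loop performs on each difference
def pvStep (acc : Option (PySem.Set Int)) (d : Int) : Option (PySem.Set Int) :=
  match acc with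
  | none => none
  | some s => if PySem.Set.contains s d then none else some (PySem.Set.add s d)

-- the flat list of pairwise differences, in A's traversal order
def pvDiffList (marks : List Int) : List Int :=
  (PySem.List.pyRange 0 (PySem.List.len marks) 1).flatMap
    (fun i => (PySem.List.pyRange (i + 1) (PySem.List.len marks) 1).map
      (fun j => PySem.List.pyGetD marks j 0 - PySem.List.pyGetD marks i 0))

-- the common tail of both programs once the (nodup) difference list is known
def pvRest (marks : List Int) (diffs : PySem.Set Int) : String :=
  match PySem.List.max? marks (fun x => x) with
  | none => ""
  | some H =>
    let missing := (PySem.List.pyRange 1 (H + 1) 1).filter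
      (fun i => !(PySem.Set.contains diffs i))
    if missing ≠ [] then "missing " ++ PySem.Str.join " " (missing.map PySem.Int.toStr)
    else "perfect"

-- B's merge step, as a named function
def pvMStep (st : List Int × List String) (v : Int) : List Int × List String :=
  let rest := pvSkip v st.1
  if decide (rest = []) || (PySem.List.pyGetD rest 0 0 != v) then
    (rest, st.2 ++ [PySem.Int.toStr v])
  else (rest, st.2)

theorem foldl_pvStep_none (l : List Int) : l.foldl pvStep none = none := by
  induction l with
  | nil => rfl
  | cons d t ih => simpa [pvStep] using ih

theorem pvApp (s : List Int) (x : Int) (t : List Int) :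
    s ++ [x] ++ t = s ++ x :: t := by
  rw [List.append_assoc]; rfl

theorem foldl_pvStep_eq : ∀ (ds s : List Int), s.Nodup →
    ds.foldl pvStep (some s) = if (s ++ ds).Nodup then some (s ++ ds) else none := by
  intro ds
  induction ds with
  | nil => intro s hs; simp [hs]
  | cons d t ih =>
    intro s hs
    by_cases hd : d ∈ s
    · have hstep : pvStep (some s) d = none := by
        simp [pvStep, hd]
      have hnd : ¬ (s ++ d :: t).Nodup := by
        intro hn
        rcases List.nodup_append.mp hn with ⟨_, _, hdisj⟩
        exact hdisj d hd d (by simp) rfl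
      rw [List.foldl_cons, hstep, foldl_pvStep_none, if_neg hnd]
    · have hstep : pvStep (some s) d = some (s ++ [d]) := by
        simp [pvStep, PySem.Set.add, hd]
      have hs' : (s ++ [d]).Nodup := by
        rw [List.nodup_append]
        refine ⟨hs, List.nodup_singleton d, ?_⟩
        intro a ha b hb
        simp only [List.mem_singleton] at hb
        subst hb
        exact fun he => hd (he ▸ ha)
      rw [List.foldl_cons, hstep, ih (s ++ [d]) hs', pvApp]

-- A's outer double loop computes exactly the insert-or-fail fold over pvDiffList
theorem pvSolveA_eq (marks : List Int) :
    solve marks = (if (pvDiffList marks).Nodup then pvRest marks (pvDiffList marks)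
                   else "not a ruler") := by
  unfold solve
  have houter :
      (PySem.List.pyRange 0 (PySem.List.len marks) 1).foldl
        (fun acc i =>
          match acc with
          | none => none
          | some diffs =>
            (PySem.List.pyRange (i + 1) (PySem.List.len marks) 1).foldl
              (fun acc2 j =>
                match acc2 with
                | none => none
                | some diffs =>
                  let d := PySem.List.pyGetD marks j 0 - PySem.List.pyGetD marks i 0
                  if PySem.Set.contains diffs d then none else some (PySem.Set.add diffs d))
              (some diffs))
        (some (PySem.Set.empty : PySem.Set Int))
      = (pvDiffList marks).foldl pvStep (some []) := by
    unfold pvDiffList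
    rw [List.foldl_flatMap]
    congr 1
    funext acc i
    cases acc with
    | none => exact (foldl_pvStep_none _).symm
    | some diffs => rw [List.foldl_map]; rfl
  rw [houter, foldl_pvStep_eq (pvDiffList marks) [] List.nodup_nil]
  simp only [List.nil_append]
  by_cases hN : (pvDiffList marks).Nodup
  · rw [if_pos hN, if_pos hN]; rfl
  · rw [if_neg hN, if_neg hN]

-- a sorted list has an adjacent equal pair iff it has a duplicate
theorem pvAdjDup : ∀ (S : List Int), S.Pairwise (· ≤ ·) →
    (((S.zip (S.drop 1)).any (fun p => p.1 == p.2)) = false ↔ S.Nodup) := by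
  intro S
  induction S with
  | nil => intro _; simp
  | cons x t ih =>
    intro hp
    have hxt : ∀ y ∈ t, x ≤ y := fun y hy => (List.pairwise_cons.mp hp).1 y hy
    have htp : t.Pairwise (· ≤ ·) := (List.pairwise_cons.mp hp).2
    cases t with
    | nil => simp
    | cons y t2 =>
      have hyt2 : ∀ z ∈ t2, y ≤ z := fun z hz => (List.pairwise_cons.mp htp).1 z hz
      have hih := ih htp
      constructor
      · intro h
        simp only [List.drop_succ_cons, List.drop_zero, List.zip_cons_cons,
          List.any_cons, Bool.or_eq_false_iff] at h
        obtain ⟨hxy, hrest⟩ := h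
        have hxy' : x ≠ y := by
          intro he; rw [he] at hxy; simp at hxy
        have hnd : (y :: t2).Nodup := hih.mp hrest
        refine List.nodup_cons.mpr ⟨?_, hnd⟩
        intro hmem
        rcases List.mem_cons.mp hmem with he | hm
        · exact hxy' he
        · have h1 : x ≤ y := hxt y (by simp)
          have h2 : y ≤ x := hyt2 x hm
          exact hxy' (le_antisymm h1 h2)
      · intro hnd
        obtain ⟨hxn, hnd'⟩ := List.nodup_cons.mp hnd
        simp only [List.drop_succ_cons, List.drop_zero, List.zip_cons_cons,
          List.any_cons, Bool.or_eq_false_iff]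
        refine ⟨?_, hih.mpr hnd'⟩
        have : x ≠ y := fun he => hxn (he ▸ List.mem_cons_self)
        simp [this]

-- the while loop on a sorted list is the filter keeping elements ≥ v
theorem pvSkip_eq_filter : ∀ (S : List Int), S.Pairwise (· ≤ ·) → ∀ (v : Int),
    pvSkip v S = S.filter (fun x => decide (v ≤ x)) := by
  intro S
  induction S with
  | nil => intro _ v; rfl
  | cons x t ih =>
    intro hp v
    have hxt : ∀ y ∈ t, x ≤ y := fun y hy => (List.pairwise_cons.mp hp).1 y hy
    have htp : t.Pairwise (· ≤ ·) := (List.pairwise_cons.mp hp).2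
    by_cases hx : x < v
    · rw [pvSkip, if_pos hx, ih htp v, List.filter_cons]
      simp [not_le.mpr hx]
    · rw [pvSkip, if_neg hx, List.filter_cons]
      have hvx : v ≤ x := not_lt.mp hx
      simp only [hvx, decide_true, if_pos]
      congr 1
      exact (List.filter_eq_self.mpr (fun y hy => by
        simp only [decide_eq_true_eq]
        exact le_trans hvx (hxt y hy))).symm

-- the appended-or-not test of pvMStep reads membership of v in S off the filtered suffix
theorem pvHeadTest (S : List Int) (hS : S.Pairwise (· ≤ ·)) (v : Int) :
    (decide (S.filter (fun x => decide (v ≤ x)) = []) ||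
      (PySem.List.pyGetD (S.filter (fun x => decide (v ≤ x))) 0 0 != v)) = !(S.contains v) := by
  by_cases hmem : v ∈ S
  · have hv : v ∈ S.filter (fun x => decide (v ≤ x)) := by
      simp [List.mem_filter, hmem]
    have hcon : S.contains v = true := by simpa using hmem
    rw [hcon]
    cases hrest : S.filter (fun x => decide (v ≤ x)) with
    | nil => rw [hrest] at hv; simp at hv
    | cons h t =>
      have hpf : (S.filter (fun x => decide (v ≤ x))).Pairwise (· ≤ ·) := hS.filter _
      rw [hrest] at hpf hv
      have hhv : h = v := by
        have hh : h ∈ S.filter (fun x => decide (v ≤ x)) := by rw [hrest]; simp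
        have hvh : v ≤ h := by
          have := List.mem_filter.mp hh
          simpa using this.2
        rcases List.mem_cons.mp hv with he | hm
        · exact he.symm
        · have : h ≤ v := (List.pairwise_cons.mp hpf).1 v hm
          exact le_antisymm this hvh
      subst hhv
      simp [pysem]
  · have hcon : S.contains v = false := by simpa using hmem
    rw [hcon]
    cases hrest : S.filter (fun x => decide (v ≤ x)) with
    | nil => simp
    | cons h t =>
      have hh : h ∈ S := by
        have : h ∈ S.filter (fun x => decide (v ≤ x)) := by rw [hrest]; simp
        exact (List.mem_filter.mp this).1
      have hne : h ≠ v := fun he => hmem (he ▸ hh)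
      simp [pysem, hne]

-- the two-pointer merge accumulates exactly the values of the range missing from S
theorem pvMergeGo : ∀ (k : Nat) (a b : Int), (b - a).toNat = k →
    ∀ (S : List Int), S.Pairwise (· ≤ ·) →
    ∀ (P : Int → Bool), (∀ x, a ≤ x → P x = true) → ∀ (acc : List String),
    ((PySem.List.pyRange a b 1).foldl pvMStep (S.filter P, acc)).2
      = acc ++ ((PySem.List.pyRange a b 1).filter (fun v => !(S.contains v))).map PySem.Int.toStr := by
  intro k
  induction k with
  | zero =>
    intro a b hk S hS P hP acc
    have hba : b ≤ a := by omega
    rw [PySem.List.pyRange_one_eq_nil hba]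
    simp
  | succ k ih =>
    intro a b hk S hS P hP acc
    have hab : a < b := by omega
    rw [PySem.List.pyRange_one_cons hab, List.foldl_cons, List.filter_cons]
    have hskip : pvSkip a (S.filter P) = S.filter (fun x => decide (a ≤ x)) := by
      rw [pvSkip_eq_filter (S.filter P) (hS.filter _) a, List.filter_filter]
      exact List.filter_congr (fun x _ => by
        by_cases hax : a ≤ x
        · simp [hax, hP x hax]
        · simp [hax])
    have hstep : pvMStep (S.filter P, acc) a
        = (S.filter (fun x => decide (a ≤ x)),
           if S.contains a then acc else acc ++ [PySem.Int.toStr a]) := by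
      unfold pvMStep
      simp only [hskip, pvHeadTest S hS a]
      cases hc : S.contains a with
      | true => simp
      | false => simp
    rw [hstep]
    have hP' : ∀ x, a + 1 ≤ x → (fun x => decide (a ≤ x)) x = true := by
      intro x hx; simp; omega
    have hrec := ih (a + 1) b (by omega) S hS (fun x => decide (a ≤ x)) hP'
    cases hc : S.contains a with
    | true =>
      rw [if_pos rfl]
      rw [hrec acc]
      simp
    | false =>
      rw [if_neg (by simp)]
      rw [hrec (acc ++ [PySem.Int.toStr a])]
      simp

-- B's normal form: the same if-nodup-then-pvRest shape as A
theorem pvSolveB_eq (marks : List Int) :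
    solve_alt marks = (if (pvDiffList marks).Nodup then pvRest marks (pvDiffList marks)
                       else "not a ruler") := by
  unfold solve_alt
  have hL : (PySem.List.pyRange 0 (PySem.List.len marks) 1).flatMap
      (fun i => (PySem.List.pyRange (i + 1) (PySem.List.len marks) 1).map
        (fun j => PySem.List.pyGetD marks j 0 - PySem.List.pyGetD marks i 0))
      = pvDiffList marks := rfl
  simp only [hL]
  set L := pvDiffList marks with hLdef
  set S := PySem.List.sorted L (fun x => x) false with hSdef
  have hperm : S.Perm L := PySem.List.sorted_perm L (fun x => x) false
  have hpair : S.Pairwise (· ≤ ·) := by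
    have := PySem.List.sorted_pairwise L (fun x => x)
    simpa using this
  have hnd : S.Nodup ↔ L.Nodup := hperm.nodup_iff
  have hslice : PySem.List.slice S (some 1) none = S.drop 1 := by
    rw [PySem.List.slice_from S (by omega : (0:Int) ≤ 1)]
    norm_num
  rw [hslice]
  by_cases hN : L.Nodup
  · have hany : ((S.zip (S.drop 1)).any (fun p => p.1 == p.2)) = false :=
      (pvAdjDup S hpair).mpr (hnd.mpr hN)
    rw [hany, if_neg (by simp), if_pos hN]
    unfold pvRest
    cases PySem.List.max? marks (fun x => x) with
    | none => rfl
    | some H =>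
      simp only
      have hstep : (fun (st : List Int × List String) v =>
          let rest := pvSkip v st.1
          if decide (rest = []) || (PySem.List.pyGetD rest 0 0 != v) then
            (rest, st.2 ++ [PySem.Int.toStr v])
          else (rest, st.2)) = pvMStep := rfl
      rw [hstep]
      have hmerge := pvMergeGo ((H + 1) - 1).toNat 1 (H + 1) rfl S hpair
        (fun _ => true) (fun _ _ => rfl) []
      rw [List.filter_true] at hmerge
      simp only [List.nil_append] at hmerge
      have hfilt : (PySem.List.pyRange 1 (H + 1) 1).filter (fun v => !(S.contains v))
          = (PySem.List.pyRange 1 (H + 1) 1).filter (fun i => !(PySem.Set.contains L i)) := by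
        apply List.filter_congr
        intro v _
        have hiff : (v ∈ S) ↔ (v ∈ L) := hperm.mem_iff
        simp [PySem.Set.contains, hiff]
      rw [hmerge, hfilt]
      by_cases hm : (PySem.List.pyRange 1 (H + 1) 1).filter
          (fun i => !(PySem.Set.contains L i)) = []
      · rw [hm]; simp
      · have hmap : ((PySem.List.pyRange 1 (H + 1) 1).filter
            (fun i => !(PySem.Set.contains L i))).map PySem.Int.toStr ≠ [] := by
          simpa [List.map_eq_nil_iff] using hm
        rw [if_pos hmap, if_pos hm]
  · have hany : ¬ ((S.zip (S.drop 1)).any (fun p => p.1 == p.2)) = false := by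
      intro h; exact hN (hnd.mp ((pvAdjDup S hpair).mp h))
    cases hb : ((S.zip (S.drop 1)).any (fun p => p.1 == p.2)) with
    | false => exact absurd hb hany
    | true => simp [hN]

-- ===== VERDICT (by name: the statement is the Claim_ definition above) =====
theorem solve_spec : Claim_equal_solve := by
  intro marks _ _
  unfold Spec_solve
  rw [pvSolveA_eq, pvSolveB_eq]
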